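-- pv_equiv track=rewrite | github.com/beroukhim-lab/BISCUT-py3 | inst/python/BISCUT_preprocessing.py | join_segs
-- ===== SOURCE A (Python) =====
-- def join_segs(joined_alt_segments, arm, telcent):
--     if (arm.endswith('p') and telcent =='tel') or ((not arm.endswith('p')) and telcent=='cent'):
--         # DONE FOR P ARMS NOW
--         #if I can do this in one script and not recursively that would be great
--         segments = joined_alt_segments
--
--         def calc_lens(segments, finished=False):
--             if finished and joined_alt_segments[0][1]==joined_alt_segments[0][0]:
--                 segments.insert(0,joined_alt_segments[0])
--             if len(segments)==1:
--                 altlen=segments[0][1]-segments[0][0]+1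
--                 notlen=0
--             else:
--                 notlen = 0
--                 for i in range(1, len(segments)):
--                     notlen = notlen + (segments[i][0] - segments[i - 1][1] - 1)
--                 altlen = sum([i[1] - i[0] + 1 for i in segments[1:]])
--             return notlen, altlen
--
--         notlen, altlen= calc_lens(segments)
--
--         while True:
--             if notlen <= altlen:
--                 notlen, altlen = calc_lens(segments, True)
--                 break
--             else: #if there's too much white space
--                 segments = segments[:-1]
--                 notlen, altlen = calc_lens(segments, False)
--         return [segments[-1][1] - segments[0][0] + 1, segments[0][0], segments[-1][1]]
--
--     else:
--         segments = joined_alt_segments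
--         def calc_lens(segments, finished=False):
--             if finished and joined_alt_segments[-1][1] == joined_alt_segments[-1][0]:
--                 segments.append(joined_alt_segments[-1])
--
--             if len(segments) == 1:
--                 altlen = segments[0][1] - segments[0][0] + 1
--                 notlen = 0
--             else:
--                 notlen = 0
--                 for i in range(0, len(segments)-1):
--                     notlen = notlen + (segments[i+1][0] - segments[i][1] - 1)
--                 altlen = sum([i[1] - i[0] + 1 for i in segments[:-1]])
--             return notlen, altlen
--
--         notlen, altlen = calc_lens(segments)
--         while True:
--             if notlen <= altlen:
--                 notlen, altlen = calc_lens(segments, True)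
--                 break
--             else:  # if there's too much white space
--                 segments = segments[1:]
--                 notlen, altlen = calc_lens(segments, False)
--         return [segments[-1][1] - segments[0][0] + 1, segments[0][0], segments[-1][1]]
-- ===== SOURCE B (Python) =====
-- def join_segs(joined_alt_segments, arm, telcent):
--     segs = joined_alt_segments
--     if (arm.endswith('p') and telcent == 'tel') or ((not arm.endswith('p')) and telcent == 'cent'):
--         # trim from the far (right) end: keep the longest prefix whose gap total
--         # does not exceed the covered length of segments[1:], found in ONE forward pass
--         first = segs[0]
--         prev = first
--         notlen = 0
--         altlen = 0
--         best_end = first[1]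
--         for seg in segs[1:]:
--             notlen += seg[0] - prev[1] - 1
--             altlen += seg[1] - seg[0] + 1
--             if notlen <= altlen:
--                 best_end = seg[1]
--             prev = seg
--         return [best_end - first[0] + 1, first[0], best_end]
--     else:
--         # trim from the front: precompute the totals once, then drop leading
--         # segments while updating the totals incrementally
--         last = segs[-1]
--         notlen = 0
--         altlen = 0
--         prev = segs[0]
--         for seg in segs[1:]:
--             notlen += seg[0] - prev[1] - 1
--             altlen += prev[1] - prev[0] + 1
--             prev = seg
--         j = 0
--         n = len(segs)
--         while j < n - 1 and notlen > altlen: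
--             notlen -= segs[j + 1][0] - segs[j][1] - 1
--             altlen -= segs[j][1] - segs[j][0] + 1
--             j += 1
--         return [last[1] - segs[j][0] + 1, segs[j][0], last[1]]
-- ===== Notes on version B (the rewrite author's own statement) =====
-- stated objective: faster
-- what changed: A rescans the whole remaining list (index loop + list comprehension) after every single trim, giving quadratic work; B computes the gap/length totals in one forward pass and, while trimming, updates them incrementally (p-side: a single fold that records the last prefix whose gaps fit; q-side: an O(1)-per-step front trim), so the whole function is one linear pass.
import Mathlib
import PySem

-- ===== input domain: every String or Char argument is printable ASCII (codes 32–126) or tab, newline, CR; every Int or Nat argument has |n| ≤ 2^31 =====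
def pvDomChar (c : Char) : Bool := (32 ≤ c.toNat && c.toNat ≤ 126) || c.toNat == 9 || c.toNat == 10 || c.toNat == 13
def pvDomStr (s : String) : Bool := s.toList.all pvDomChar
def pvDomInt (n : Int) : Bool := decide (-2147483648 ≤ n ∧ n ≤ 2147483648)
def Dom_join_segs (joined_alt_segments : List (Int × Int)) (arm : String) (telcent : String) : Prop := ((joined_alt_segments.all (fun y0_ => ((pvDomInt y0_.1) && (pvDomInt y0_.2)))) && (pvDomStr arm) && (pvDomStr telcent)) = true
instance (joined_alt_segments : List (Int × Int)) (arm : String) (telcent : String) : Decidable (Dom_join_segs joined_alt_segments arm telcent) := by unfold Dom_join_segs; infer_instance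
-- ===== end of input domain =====

-- B replaces A's quadratic rescan-after-each-trim loop by running gap/length sums maintained
-- in a single pass (objective: faster). Equivalence is about the RETURN value only: when no
-- trimming happens and the boundary segment is a point, Python A also mutates its list argument
-- in place (inserts/appends a duplicate); B performs no mutation.

-- ===== PORT A =====
-- calc_lens of the p-arm branch (trim from the right); returns (notlen, altlen, segments),
-- the third component carrying the list as (possibly) mutated by the 'finished' insert.
def calcLensP (joined segments : List (Int × Int)) (finished : Bool) : Int × Int × List (Int × Int) :=
  let segments := if finished && ((PySem.List.pyGetD joined 0 (0,0)).2 == (PySem.List.pyGetD joined 0 (0,0)).1)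
    then PySem.List.insert segments 0 (PySem.List.pyGetD joined 0 (0,0)) else segments
  if segments.length = 1 then
    (0, (PySem.List.pyGetD segments 0 (0,0)).2 - (PySem.List.pyGetD segments 0 (0,0)).1 + 1, segments)
  else
    let notlen := (PySem.List.pyRange 1 (segments.length : Int) 1).foldl
      (fun acc i => acc + ((PySem.List.pyGetD segments i (0,0)).1 - (PySem.List.pyGetD segments (i-1) (0,0)).2 - 1)) 0
    let altlen := ((PySem.List.slice segments (some 1) none).map (fun p => p.2 - p.1 + 1)).sum
    (notlen, altlen, segments)

-- the 'while True' loop of the p-arm branch; fuel only makes the recursion total (the Python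
-- loop always breaks before the list can shrink past empty on admitted inputs)
def loopP (joined : List (Int × Int)) : Nat → List (Int × Int) → Int → Int → List (Int × Int)
  | 0, segments, _, _ => segments
  | fuel+1, segments, notlen, altlen =>
    if notlen ≤ altlen then (calcLensP joined segments true).2.2
    else
      let s := PySem.List.slice segments none (some (-1))
      let r := calcLensP joined s false
      loopP joined fuel s r.1 r.2.1

-- calc_lens of the q-arm branch (trim from the left)
def calcLensQ (joined segments : List (Int × Int)) (finished : Bool) : Int × Int × List (Int × Int) :=
  let segments := if finished && ((PySem.List.pyGetD joined (-1) (0,0)).2 == (PySem.List.pyGetD joined (-1) (0,0)).1)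
    then segments ++ [PySem.List.pyGetD joined (-1) (0,0)] else segments
  if segments.length = 1 then
    (0, (PySem.List.pyGetD segments 0 (0,0)).2 - (PySem.List.pyGetD segments 0 (0,0)).1 + 1, segments)
  else
    let notlen := (PySem.List.pyRange 0 ((segments.length : Int) - 1) 1).foldl
      (fun acc i => acc + ((PySem.List.pyGetD segments (i+1) (0,0)).1 - (PySem.List.pyGetD segments i (0,0)).2 - 1)) 0
    let altlen := ((PySem.List.slice segments none (some (-1))).map (fun p => p.2 - p.1 + 1)).sum
    (notlen, altlen, segments)

def loopQ (joined : List (Int × Int)) : Nat → List (Int × Int) → Int → Int → List (Int × Int)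
  | 0, segments, _, _ => segments
  | fuel+1, segments, notlen, altlen =>
    if notlen ≤ altlen then (calcLensQ joined segments true).2.2
    else
      let s := PySem.List.slice segments (some 1) none
      let r := calcLensQ joined s false
      loopQ joined fuel s r.1 r.2.1

def join_segs (joined_alt_segments : List (Int × Int)) (arm : String) (telcent : String) : List Int :=
  if (PySem.Str.endswith arm "p" && (telcent == "tel")) || (!(PySem.Str.endswith arm "p") && (telcent == "cent")) then
    let r0 := calcLensP joined_alt_segments joined_alt_segments false
    let segments := loopP joined_alt_segments (joined_alt_segments.length + 1) joined_alt_segments r0.1 r0.2.1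
    [(PySem.List.pyGetD segments (-1) (0,0)).2 - (PySem.List.pyGetD segments 0 (0,0)).1 + 1,
     (PySem.List.pyGetD segments 0 (0,0)).1, (PySem.List.pyGetD segments (-1) (0,0)).2]
  else
    let r0 := calcLensQ joined_alt_segments joined_alt_segments false
    let segments := loopQ joined_alt_segments (joined_alt_segments.length + 1) joined_alt_segments r0.1 r0.2.1
    [(PySem.List.pyGetD segments (-1) (0,0)).2 - (PySem.List.pyGetD segments 0 (0,0)).1 + 1,
     (PySem.List.pyGetD segments 0 (0,0)).1, (PySem.List.pyGetD segments (-1) (0,0)).2]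

-- ===== PORT B =====
-- Source B's front-trimming while loop (an index walk there), as structural recursion on the list:
-- the same trims with the same incrementally updated sums
def trimFrontB : List (Int × Int) → Int → Int → List (Int × Int)
  | [], _, _ => []
  | [s], _, _ => [s]
  | s0 :: s1 :: rest, notlen, altlen =>
    if notlen ≤ altlen then s0 :: s1 :: rest
    else trimFrontB (s1 :: rest) (notlen - (s1.1 - s0.2 - 1)) (altlen - (s0.2 - s0.1 + 1))

def join_segs_alt (joined_alt_segments : List (Int × Int)) (arm : String) (telcent : String) : List Int :=
  if (PySem.Str.endswith arm "p" && (telcent == "tel")) || (!(PySem.Str.endswith arm "p") && (telcent == "cent")) then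
    -- single forward pass over segs[1:] carrying (prev, notlen, altlen, best_end)
    let first := PySem.List.pyGetD joined_alt_segments 0 (0,0)
    let st := joined_alt_segments.tail.foldl
      (fun (st : (Int × Int) × Int × Int × Int) seg =>
        let notlen := st.2.1 + (seg.1 - st.1.2 - 1)
        let altlen := st.2.2.1 + (seg.2 - seg.1 + 1)
        (seg, notlen, altlen, if notlen ≤ altlen then seg.2 else st.2.2.2))
      (first, 0, 0, first.2)
    [st.2.2.2 - first.1 + 1, first.1, st.2.2.2]
  else
    -- totals once (fold carrying (prev, notlen, altlen)), then incremental front trim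
    let last := PySem.List.pyGetD joined_alt_segments (-1) (0,0)
    let st := joined_alt_segments.tail.foldl
      (fun (st : (Int × Int) × Int × Int) seg =>
        (seg, st.2.1 + (seg.1 - st.1.2 - 1), st.2.2 + (st.1.2 - st.1.1 + 1)))
      (PySem.List.pyGetD joined_alt_segments 0 (0,0), 0, 0)
    let t := trimFrontB joined_alt_segments st.2.1 st.2.2
    let h := t.headD (0,0)
    [last.2 - h.1 + 1, h.1, last.2]

-- ===== PRECONDITION & SPEC =====
-- gap total of adjacent segments, and covered-length total — used only to state Pre_ (and by the proofs)
def pvGaps : List (Int × Int) → Int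
  | [] => 0
  | [_] => 0
  | p :: q :: r => (q.1 - p.2 - 1) + pvGaps (q :: r)

def pvLens (s : List (Int × Int)) : Int := (s.map (fun p => p.2 - p.1 + 1)).sum

def pvNl (s : List (Int × Int)) : Int := if s.length = 1 then 0 else pvGaps s
def pvAlP (s : List (Int × Int)) : Int := if s.length = 1 then pvLens s else pvLens s.tail
def pvAlQ (s : List (Int × Int)) : Int := if s.length = 1 then pvLens s else pvLens s.dropLast
def pvBranch1 (arm telcent : String) : Bool :=
  (PySem.Str.endswith arm "p" && (telcent == "tel")) || (!(PySem.Str.endswith arm "p") && (telcent == "cent"))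

-- Pre_ excludes exactly the inputs on which Python A raises IndexError: the empty list, and
-- lists whose trimming loop empties them entirely (no nonempty prefix — resp. suffix — whose
-- gap total is within the covered length); A returns on all other inputs.
def Pre_join_segs (joined_alt_segments : List (Int × Int)) (arm : String) (telcent : String) : Prop :=
  joined_alt_segments ≠ [] ∧
  (if pvBranch1 arm telcent
    then ∃ k, k < joined_alt_segments.length ∧ pvNl (joined_alt_segments.take (k+1)) ≤ pvAlP (joined_alt_segments.take (k+1))
    else ∃ j, j < joined_alt_segments.length ∧ pvNl (joined_alt_segments.drop j) ≤ pvAlQ (joined_alt_segments.drop j))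

instance (joined_alt_segments : List (Int × Int)) (arm : String) (telcent : String) : Decidable (Pre_join_segs joined_alt_segments arm telcent) := by
  unfold Pre_join_segs; infer_instance

def pvWitness_join_segs : (List (Int × Int)) × String × String := ([(1,5),(10,12)], "1p", "tel")

def Spec_join_segs (joined_alt_segments : List (Int × Int)) (arm : String) (telcent : String) (out : List Int) : Prop := out = join_segs_alt joined_alt_segments arm telcent
instance (joined_alt_segments : List (Int × Int)) (arm : String) (telcent : String) (out : List Int) : Decidable (Spec_join_segs joined_alt_segments arm telcent out) := by unfold Spec_join_segs; infer_instance

-- ===== CLAIM (what is proved, stated in full; the proofs are below) =====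
def Claim_equal_join_segs : Prop := ∀ (joined_alt_segments : List (Int × Int)) (arm : String) (telcent : String), Dom_join_segs joined_alt_segments arm telcent → Pre_join_segs joined_alt_segments arm telcent → Spec_join_segs joined_alt_segments arm telcent (join_segs joined_alt_segments arm telcent)

-- ===== LEMMAS AND PROOFS =====

-- the comparison A's loop makes on a remaining list, branch 1 / branch 2
def pvCondP (s : List (Int × Int)) : Prop := pvNl s ≤ pvAlP s
def pvCondQ (s : List (Int × Int)) : Prop := pvNl s ≤ pvAlQ s

-- the list A's loop stops with, branch 1 (longest kept prefix)
def chooseP (s : List (Int × Int)) : List (Int × Int) :=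
  if s.length ≤ 1 then s
  else if pvGaps s ≤ pvLens s.tail then s
  else chooseP s.dropLast
termination_by s.length
decreasing_by simp [List.length_dropLast]; omega

-- the list A's loop stops with, branch 2 (longest kept suffix)
def chooseQ : List (Int × Int) → List (Int × Int)
  | [] => []
  | [p] => [p]
  | p :: q :: r => if pvGaps (p :: q :: r) ≤ pvLens ((p :: q :: r).dropLast) then p :: q :: r else chooseQ (q :: r)

lemma pvLens_append (u : List (Int × Int)) (x : Int × Int) :
    pvLens (u ++ [x]) = pvLens u + (x.2 - x.1 + 1) := by
  simp [pvLens]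

lemma pvGaps_append (u : List (Int × Int)) (x : Int × Int) (hu : u ≠ []) :
    pvGaps (u ++ [x]) = pvGaps u + (x.1 - (u.getLastD (0,0)).2 - 1) := by
  induction u with
  | nil => simp at hu
  | cons p t ih =>
    cases t with
    | nil => simp [pvGaps]
    | cons q r =>
      have h := ih (by simp)
      simp only [List.cons_append] at h ⊢
      simp [pvGaps, h]
      ring

lemma gapsIdxP (s : List (Int × Int)) :
    (PySem.List.pyRange 1 (s.length : Int) 1).foldl
      (fun acc i => acc + ((PySem.List.pyGetD s i (0,0)).1 - (PySem.List.pyGetD s (i-1) (0,0)).2 - 1)) 0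
    = pvGaps s := by
  induction s using List.reverseRecOn with
  | nil => simp [PySem.List.pyRange_one_eq_nil, pvGaps]
  | append_singleton u x ih =>
    cases u with
    | nil => simp [PySem.List.pyRange_one_eq_nil, pvGaps]
    | cons p t =>
      have hlen : ((((p :: t) ++ [x]).length : Int)) = ((p :: t).length : Int) + 1 := by simp
      rw [hlen, PySem.List.pyRange_one_succ_right (by exact_mod_cast Nat.one_le_iff_ne_zero.mpr (by simp)),
          List.foldl_append]
      have hcongr : ∀ (acc : Int), ∀ i ∈ PySem.List.pyRange 1 (((p :: t).length : Int)) 1,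
          acc + ((PySem.List.pyGetD ((p :: t) ++ [x]) i (0,0)).1 - (PySem.List.pyGetD ((p :: t) ++ [x]) (i-1) (0,0)).2 - 1)
          = acc + ((PySem.List.pyGetD (p :: t) i (0,0)).1 - (PySem.List.pyGetD (p :: t) (i-1) (0,0)).2 - 1) := by
        intro acc i hi
        rw [PySem.List.mem_pyRange_one] at hi
        have h1 : 0 ≤ i := by omega
        have h2 : i < ((p :: t).length : Int) := hi.2
        rw [PySem.List.pyGetD_eq_getElem _ _ h1 (by simpa using (by omega : i < (((p :: t) ++ [x]).length : Int))),
            PySem.List.pyGetD_eq_getElem _ _ (by omega : (0:Int) ≤ i - 1) (by simpa using (by omega : i - 1 < (((p :: t) ++ [x]).length : Int))),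
            PySem.List.pyGetD_eq_getElem _ _ h1 (by simpa using h2),
            PySem.List.pyGetD_eq_getElem _ _ (by omega : (0:Int) ≤ i - 1) (by simpa using (by omega : i - 1 < (((p :: t).length : Int)))),
            List.getElem_append_left (by omega), List.getElem_append_left (by omega)]
      rw [PySem.List.foldl_congr_mem' _ _ _ _ (fun i hi acc => hcongr acc i hi), ih]
      simp only [List.foldl_cons, List.foldl_nil]
      have hx : PySem.List.pyGetD ((p :: t) ++ [x]) (((p :: t).length : Int)) (0,0) = x := by
        rw [PySem.List.pyGetD_eq_getElem _ _ (by omega) (by simp)]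
        exact List.getElem_concat_length (by simp) _
      have hl : PySem.List.pyGetD ((p :: t) ++ [x]) (((p :: t).length : Int) - 1) (0,0) = (p :: t).getLastD (0,0) := by
        rw [PySem.List.pyGetD_eq_getElem _ _ (by simp) (by simp),
            List.getElem_append_left (by simp)]
        rw [List.getLastD_eq_getLast?, List.getLast?_eq_some_getLast (by simp), Option.getD_some,
            List.getLast_eq_getElem]
        congr 1
        simp
      rw [hx, hl, pvGaps_append _ _ (by simp)]

lemma gapsIdxQ (s : List (Int × Int)) :
    (PySem.List.pyRange 0 ((s.length : Int) - 1) 1).foldl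
      (fun acc i => acc + ((PySem.List.pyGetD s (i+1) (0,0)).1 - (PySem.List.pyGetD s i (0,0)).2 - 1)) 0
    = pvGaps s := by
  induction s using List.reverseRecOn with
  | nil => simp [PySem.List.pyRange_one_eq_nil, pvGaps]
  | append_singleton u x ih =>
    cases u with
    | nil => simp [PySem.List.pyRange_one_eq_nil, pvGaps]
    | cons p t =>
      have hlen : ((((p :: t) ++ [x]).length : Int)) - 1 = (((p :: t).length : Int) - 1) + 1 := by simp
      rw [hlen, PySem.List.pyRange_one_succ_right (by simp), List.foldl_append]
      have hcongr : ∀ (acc : Int), ∀ i ∈ PySem.List.pyRange 0 (((p :: t).length : Int) - 1) 1,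
          acc + ((PySem.List.pyGetD ((p :: t) ++ [x]) (i+1) (0,0)).1 - (PySem.List.pyGetD ((p :: t) ++ [x]) i (0,0)).2 - 1)
          = acc + ((PySem.List.pyGetD (p :: t) (i+1) (0,0)).1 - (PySem.List.pyGetD (p :: t) i (0,0)).2 - 1) := by
        intro acc i hi
        rw [PySem.List.mem_pyRange_one] at hi
        obtain ⟨h0, h1⟩ := hi
        have h1' : i < (t.length : Int) := by
          simp only [List.length_cons] at h1; push_cast at h1; omega
        rw [PySem.List.pyGetD_eq_getElem _ _ (by omega : (0:Int) ≤ i + 1) (by simp only [List.length_cons, List.length_append]; push_cast; omega),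
            PySem.List.pyGetD_eq_getElem _ _ h0 (by simp only [List.length_cons, List.length_append]; push_cast; omega),
            PySem.List.pyGetD_eq_getElem _ _ (by omega : (0:Int) ≤ i + 1) (by simp only [List.length_cons]; push_cast; omega),
            PySem.List.pyGetD_eq_getElem _ _ h0 (by simp only [List.length_cons]; push_cast; omega),
            List.getElem_append_left (by simp only [List.length_cons]; omega), List.getElem_append_left (by simp only [List.length_cons]; omega)]
      rw [PySem.List.foldl_congr_mem' _ _ _ _ (fun i hi acc => hcongr acc i hi), ih]
      simp only [List.foldl_cons, List.foldl_nil]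
      have hx : PySem.List.pyGetD ((p :: t) ++ [x]) ((((p :: t).length : Int) - 1) + 1) (0,0) = x := by
        rw [PySem.List.pyGetD_eq_getElem _ _ (by omega) (by simp)]
        exact List.getElem_concat_length (by simp) _
      have hl : PySem.List.pyGetD ((p :: t) ++ [x]) (((p :: t).length : Int) - 1) (0,0) = (p :: t).getLastD (0,0) := by
        rw [PySem.List.pyGetD_eq_getElem _ _ (by simp) (by simp),
            List.getElem_append_left (by simp)]
        rw [List.getLastD_eq_getLast?, List.getLast?_eq_some_getLast (by simp), Option.getD_some,
            List.getLast_eq_getElem]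
        congr 1
        simp
      rw [hx, hl, pvGaps_append _ _ (by simp)]

lemma calcP_false (joined s : List (Int × Int)) :
    calcLensP joined s false = (pvNl s, pvAlP s, s) := by
  by_cases h1 : s.length = 1
  · obtain ⟨p, rfl⟩ := List.length_eq_one_iff.mp h1
    simp [calcLensP, pvNl, pvAlP, pvLens]
  · simp [calcLensP, h1, pvNl, pvAlP, gapsIdxP, PySem.List.slice_from_one, pvLens]

lemma calcQ_false (joined s : List (Int × Int)) :
    calcLensQ joined s false = (pvNl s, pvAlQ s, s) := by
  by_cases h1 : s.length = 1
  · obtain ⟨p, rfl⟩ := List.length_eq_one_iff.mp h1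
    simp [calcLensQ, pvNl, pvAlQ, pvLens]
  · simp [calcLensQ, h1, pvNl, pvAlQ, gapsIdxQ, PySem.List.slice_to_neg_one, pvLens]

lemma calcP_true_list (joined s : List (Int × Int)) :
    (calcLensP joined s true).2.2 = if ((PySem.List.pyGetD joined 0 (0,0)).2 == (PySem.List.pyGetD joined 0 (0,0)).1) = true
      then PySem.List.pyGetD joined 0 (0,0) :: s else s := by
  unfold calcLensP
  by_cases hc : ((PySem.List.pyGetD joined 0 (0,0)).2 == (PySem.List.pyGetD joined 0 (0,0)).1) = true <;>
    simp only [hc, Bool.true_and, if_true, if_false, PySem.List.insert_zero, Bool.false_eq_true] <;>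
    split <;> rfl

lemma calcQ_true_list (joined s : List (Int × Int)) :
    (calcLensQ joined s true).2.2 = if ((PySem.List.pyGetD joined (-1) (0,0)).2 == (PySem.List.pyGetD joined (-1) (0,0)).1) = true
      then s ++ [PySem.List.pyGetD joined (-1) (0,0)] else s := by
  unfold calcLensQ
  by_cases hc : ((PySem.List.pyGetD joined (-1) (0,0)).2 == (PySem.List.pyGetD joined (-1) (0,0)).1) = true <;>
    simp only [hc, Bool.true_and, if_true, if_false, Bool.false_eq_true] <;>
    split <;> rfl

lemma calcP_true_ends (joined s : List (Int × Int)) (hs : s ≠ []) (hh : s.head? = joined.head?) :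
    ((calcLensP joined s true).2.2).head? = s.head? ∧ ((calcLensP joined s true).2.2).getLast? = s.getLast? := by
  rw [calcP_true_list]
  obtain ⟨a, t, rfl⟩ := List.exists_cons_of_ne_nil hs
  have hj : joined.head? = some a := by rw [← hh]; rfl
  obtain ⟨j0, jt, rfl⟩ : ∃ b l, joined = b :: l := by
    cases joined with
    | nil => simp at hj
    | cons b l => exact ⟨b, l, rfl⟩
  have hj0 : j0 = a := by simpa using hj
  subst hj0
  split <;> simp [PySem.List.pyGetD_zero_cons]

lemma calcQ_true_ends (joined s : List (Int × Int)) (hs : s ≠ []) (hl : s.getLast? = joined.getLast?) :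
    ((calcLensQ joined s true).2.2).head? = s.head? ∧ ((calcLensQ joined s true).2.2).getLast? = s.getLast? := by
  rw [calcQ_true_list]
  have hjne : joined ≠ [] := by
    intro hnil
    rw [hnil] at hl
    simp [List.getLast?_eq_none_iff] at hl
    exact hs hl
  have hgl : PySem.List.pyGetD joined (-1) (0,0) = joined.getLast hjne := PySem.List.pyGetD_neg_one joined (0,0) hjne
  split
  · refine ⟨List.head?_append_of_ne_nil _ hs, ?_⟩
    rw [List.getLast?_concat, hgl, hl, List.getLast?_eq_some_getLast hjne]
  · exact ⟨rfl, rfl⟩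

lemma chooseP_eq_self (s : List (Int × Int)) (h : pvCondP s) : chooseP s = s := by
  rw [chooseP]
  by_cases hle : s.length ≤ 1
  · simp [hle]
  · have h1 : s.length ≠ 1 := by omega
    have hg : pvGaps s ≤ pvLens s.tail := by simpa [pvCondP, pvNl, pvAlP, h1] using h
    simp [hle, hg]

lemma chooseP_head?_ne (s : List (Int × Int)) : (chooseP s).head? = s.head? ∧ (s ≠ [] → chooseP s ≠ []) := by
  fun_induction chooseP s with
  | case1 s hle => exact ⟨rfl, fun h => h⟩
  | case2 s hle hg => exact ⟨rfl, fun h => h⟩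
  | case3 s hle hg ih =>
    obtain ⟨a, b, t, rfl⟩ : ∃ a b t, s = a :: b :: t := by
      match s with
      | [] => simp at hle
      | [p] => simp at hle
      | a :: b :: t => exact ⟨a, b, t, rfl⟩
    refine ⟨?_, fun _ => ?_⟩
    · rw [ih.1]
      simp [List.dropLast]
    · apply ih.2
      simp [List.dropLast]

lemma chooseP_ne_nil (s : List (Int × Int)) (hs : s ≠ []) : chooseP s ≠ [] :=
  (chooseP_head?_ne s).2 hs

lemma chooseP_head? (s : List (Int × Int)) : (chooseP s).head? = s.head? :=
  (chooseP_head?_ne s).1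

lemma chooseQ_getLast?_ne (s : List (Int × Int)) : (chooseQ s).getLast? = s.getLast? ∧ (s ≠ [] → chooseQ s ≠ []) := by
  fun_induction chooseQ s with
  | case1 => exact ⟨rfl, fun h => h⟩
  | case2 p => exact ⟨rfl, fun h => h⟩
  | case3 p q r hg => exact ⟨rfl, fun h => h⟩
  | case4 p q r hg ih =>
    refine ⟨?_, fun _ => ih.2 (by simp)⟩
    rw [ih.1]
    rfl

lemma chooseQ_ne_nil (s : List (Int × Int)) (hs : s ≠ []) : chooseQ s ≠ [] :=
  (chooseQ_getLast?_ne s).2 hs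

lemma chooseQ_getLast? (s : List (Int × Int)) : (chooseQ s).getLast? = s.getLast? :=
  (chooseQ_getLast?_ne s).1

lemma loopP_spec (joined : List (Int × Int)) : ∀ (fuel : Nat) (s : List (Int × Int)), s.length ≤ fuel →
    (∃ k, k < s.length ∧ pvCondP (s.take (k+1))) →
    loopP joined fuel s (pvNl s) (pvAlP s) = (calcLensP joined (chooseP s) true).2.2 := by
  intro fuel
  induction fuel with
  | zero =>
    intro s hlen hex
    obtain ⟨k, hk, _⟩ := hex
    omega
  | succ fuel ih =>
    intro s hlen hex
    simp only [loopP]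
    by_cases hc : pvNl s ≤ pvAlP s
    · rw [if_pos hc, chooseP_eq_self s hc]
    · rw [if_neg hc]
      have hs2 : 2 ≤ s.length := by
        obtain ⟨k, hk, hck⟩ := hex
        by_contra h2
        push Not at h2
        have hk0 : k = 0 := by omega
        subst hk0
        rw [List.take_of_length_le (by omega)] at hck
        exact hc hck
      have hne1 : s.length ≠ 1 := by omega
      have hwit : ∃ k, k < s.dropLast.length ∧ pvCondP (s.dropLast.take (k+1)) := by
        obtain ⟨k, hk, hck⟩ := hex
        have hks : k + 1 < s.length := by
          rcases Nat.lt_or_ge (k+1) s.length with h | h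
          · exact h
          · exfalso
            rw [List.take_of_length_le (by omega)] at hck
            exact hc hck
        refine ⟨k, by simp [List.length_dropLast]; omega, ?_⟩
        rw [List.dropLast_eq_take, List.take_take]
        rwa [min_eq_left (by omega)]
      have hcs : chooseP s = chooseP s.dropLast := by
        rw [chooseP]
        have h1 : ¬ s.length ≤ 1 := by omega
        have hg : ¬ pvGaps s ≤ pvLens s.tail := by
          intro hgle
          exact hc (by simpa [pvNl, pvAlP, hne1] using hgle)
        simp [h1, hg]
      rw [PySem.List.slice_to_neg_one, calcP_false, hcs]
      exact ih s.dropLast (by simp [List.length_dropLast]; omega) hwit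

lemma loopQ_spec (joined : List (Int × Int)) : ∀ (fuel : Nat) (s : List (Int × Int)), s.length ≤ fuel →
    (∃ j, j < s.length ∧ pvCondQ (s.drop j)) →
    loopQ joined fuel s (pvNl s) (pvAlQ s) = (calcLensQ joined (chooseQ s) true).2.2 := by
  intro fuel
  induction fuel with
  | zero =>
    intro s hlen hex
    obtain ⟨j, hj, _⟩ := hex
    omega
  | succ fuel ih =>
    intro s hlen hex
    simp only [loopQ]
    by_cases hc : pvNl s ≤ pvAlQ s
    · rw [if_pos hc]
      congr 1
      have : chooseQ s = s := by
        match s with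
        | [] => rfl
        | [p] => rfl
        | p :: q :: r =>
          rw [chooseQ]
          have hg : pvGaps (p :: q :: r) ≤ pvLens ((p :: q :: r).dropLast) := by
            simpa [pvNl, pvAlQ] using hc
          rw [if_pos hg]
      rw [this]
    · rw [if_neg hc]
      have hs2 : 2 ≤ s.length := by
        obtain ⟨j, hj, hcj⟩ := hex
        by_contra h2
        push Not at h2
        have hj0 : j = 0 := by omega
        subst hj0
        rw [List.drop_zero] at hcj
        exact hc hcj
      obtain ⟨p, q, r, rfl⟩ : ∃ p q r, s = p :: q :: r := by
        match s with
        | [] => simp at hs2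
        | [p] => simp at hs2
        | p :: q :: r => exact ⟨p, q, r, rfl⟩
      have hwit : ∃ j, j < (q :: r).length ∧ pvCondQ ((q :: r).drop j) := by
        obtain ⟨j, hj, hcj⟩ := hex
        have hj1 : 1 ≤ j := by
          by_contra h0
          push Not at h0
          have : j = 0 := by omega
          subst this
          rw [List.drop_zero] at hcj
          exact hc hcj
        obtain ⟨j', rfl⟩ : ∃ j', j = j' + 1 := ⟨j - 1, by omega⟩
        refine ⟨j', by simp at hj ⊢; omega, ?_⟩
        rwa [List.drop_succ_cons] at hcj
      have hcs : chooseQ (p :: q :: r) = chooseQ (q :: r) := by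
        rw [chooseQ]
        have hg : ¬ pvGaps (p :: q :: r) ≤ pvLens ((p :: q :: r).dropLast) := by
          intro hgle
          exact hc (by simpa [pvNl, pvAlQ] using hgle)
        rw [if_neg hg]
      rw [PySem.List.slice_from_one, calcQ_false, hcs]
      exact ih (q :: r) (by simp at hlen ⊢; omega) hwit

lemma pvLens_dropLast (u : List (Int × Int)) (hu : u ≠ []) :
    pvLens u.dropLast + ((u.getLastD (0,0)).2 - (u.getLastD (0,0)).1 + 1) = pvLens u := by
  conv_rhs => rw [← List.dropLast_concat_getLast hu]
  rw [pvLens_append]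
  rw [List.getLastD_eq_getLast?, List.getLast?_eq_some_getLast hu, Option.getD_some]

lemma foldB1 (s0 : Int × Int) (t : List (Int × Int)) :
    t.foldl
      (fun (st : (Int × Int) × Int × Int × Int) seg =>
        (seg, st.2.1 + (seg.1 - st.1.2 - 1), st.2.2.1 + (seg.2 - seg.1 + 1),
          if st.2.1 + (seg.1 - st.1.2 - 1) ≤ st.2.2.1 + (seg.2 - seg.1 + 1) then seg.2 else st.2.2.2))
      (s0, 0, 0, s0.2)
    = ((s0 :: t).getLastD (0,0), pvGaps (s0 :: t), pvLens t, ((chooseP (s0 :: t)).getLastD (0,0)).2) := by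
  induction t using List.reverseRecOn with
  | nil =>
    rw [chooseP]
    simp [pvGaps, pvLens]
  | append_singleton t x ih =>
    rw [show s0 :: (t ++ [x]) = (s0 :: t) ++ [x] from rfl, List.foldl_append, ih]
    simp only [List.foldl_cons, List.foldl_nil]
    have hG := pvGaps_append (s0 :: t) x (by simp)
    have hP := pvLens_append t x
    have htail : ((s0 :: t) ++ [x]).tail = t ++ [x] := rfl
    simp only [Prod.mk.injEq]
    refine ⟨by rw [List.getLastD_concat], by rw [hG], by rw [hP], ?_⟩
    conv_rhs => rw [chooseP]
    rw [if_neg (show ¬ ((s0 :: t) ++ [x]).length ≤ 1 by simp)]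
    by_cases hg : pvGaps ((s0 :: t) ++ [x]) ≤ pvLens (((s0 :: t) ++ [x]).tail)
    · have hg' : pvGaps (s0 :: t) + (x.1 - ((s0 :: t).getLastD (0,0)).2 - 1) ≤ pvLens t + (x.2 - x.1 + 1) := by
        rw [← hG, ← hP, ← htail]
        exact hg
      rw [if_pos hg, if_pos hg', List.getLastD_concat]
    · have hg' : ¬ pvGaps (s0 :: t) + (x.1 - ((s0 :: t).getLastD (0,0)).2 - 1) ≤ pvLens t + (x.2 - x.1 + 1) := by
        rw [← hG, ← hP, ← htail]
        exact hg
      rw [if_neg hg, if_neg hg', List.dropLast_concat]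

lemma foldB2 (s0 : Int × Int) (t : List (Int × Int)) :
    t.foldl
      (fun (st : (Int × Int) × Int × Int) seg =>
        (seg, st.2.1 + (seg.1 - st.1.2 - 1), st.2.2 + (st.1.2 - st.1.1 + 1)))
      (s0, 0, 0)
    = ((s0 :: t).getLastD (0,0), pvGaps (s0 :: t), pvLens ((s0 :: t).dropLast)) := by
  induction t using List.reverseRecOn with
  | nil => simp [pvGaps, pvLens]
  | append_singleton t x ih =>
    rw [show s0 :: (t ++ [x]) = (s0 :: t) ++ [x] from rfl, List.foldl_append, ih]
    simp only [List.foldl_cons, List.foldl_nil]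
    have hG := pvGaps_append (s0 :: t) x (by simp)
    simp only [Prod.mk.injEq]
    refine ⟨by rw [List.getLastD_concat], by rw [hG], ?_⟩
    rw [List.dropLast_concat]
    exact pvLens_dropLast (s0 :: t) (by simp)

lemma trimB2 (s : List (Int × Int)) (hex : ∃ j, j < s.length ∧ pvCondQ (s.drop j)) :
    trimFrontB s (pvGaps s) (pvLens s.dropLast) = chooseQ s := by
  induction s with
  | nil => rfl
  | cons p t ih =>
    cases t with
    | nil => rfl
    | cons q r =>
      rw [trimFrontB, chooseQ]
      by_cases hg : pvGaps (p :: q :: r) ≤ pvLens ((p :: q :: r).dropLast)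
      · rw [if_pos hg, if_pos hg]
      · rw [if_neg hg, if_neg hg]
        have e1 : pvGaps (p :: q :: r) - (q.1 - p.2 - 1) = pvGaps (q :: r) := by
          simp [pvGaps]
        have e2 : pvLens ((p :: q :: r).dropLast) - (p.2 - p.1 + 1) = pvLens ((q :: r).dropLast) := by
          simp only [List.dropLast_cons₂, pvLens, List.map_cons, List.sum_cons]
          ring
        rw [e1, e2]
        apply ih
        obtain ⟨j, hj, hcj⟩ := hex
        have hj1 : 1 ≤ j := by
          by_contra h0
          push Not at h0
          have : j = 0 := by omega
          subst this
          rw [List.drop_zero] at hcj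
          exact hg (by simpa [pvCondQ, pvNl, pvAlQ] using hcj)
        obtain ⟨j', rfl⟩ : ∃ j', j = j' + 1 := ⟨j - 1, by omega⟩
        refine ⟨j', by simp at hj ⊢; omega, ?_⟩
        rwa [List.drop_succ_cons] at hcj

-- ===== VERDICT (by name: the statement is the Claim_ definition above) =====
theorem join_segs_spec : Claim_equal_join_segs := by
  intro joined arm telcent hdom hpre
  obtain ⟨hne, hbr⟩ := hpre
  unfold Spec_join_segs join_segs join_segs_alt
  obtain ⟨s0, t, rfl⟩ := List.exists_cons_of_ne_nil hne
  by_cases hb : ((PySem.Str.endswith arm "p" && (telcent == "tel")) || (!(PySem.Str.endswith arm "p") && (telcent == "cent"))) = true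
  · rw [if_pos hb, if_pos hb]
    rw [if_pos (show pvBranch1 arm telcent = true from hb)] at hbr
    have hloop := loopP_spec (s0 :: t) ((s0 :: t).length + 1) (s0 :: t) (by omega) hbr
    have hCne : chooseP (s0 :: t) ≠ [] := chooseP_ne_nil _ (by simp)
    have hends := calcP_true_ends (s0 :: t) (chooseP (s0 :: t)) hCne (chooseP_head? _)
    set L := (calcLensP (s0 :: t) (chooseP (s0 :: t)) true).2.2 with hL
    have hLhead : L.head? = some s0 := by
      rw [hends.1, chooseP_head?]
      rfl
    have hLlast : L.getLast? = some ((chooseP (s0 :: t)).getLastD (0,0)) := by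
      rw [hends.2, List.getLastD_eq_getLast?, List.getLast?_eq_some_getLast hCne, Option.getD_some]
    have hget0 : PySem.List.pyGetD L 0 (0,0) = s0 := by
      cases hLc : L with
      | nil => rw [hLc] at hLhead; simp at hLhead
      | cons a l =>
        rw [hLc] at hLhead
        rw [PySem.List.pyGetD_zero_cons]
        simpa using hLhead
    have hLne : L ≠ [] := by
      intro h0
      rw [h0] at hLhead
      simp at hLhead
    have hgetm1 : PySem.List.pyGetD L (-1) (0,0) = (chooseP (s0 :: t)).getLastD (0,0) := by
      rw [PySem.List.pyGetD_neg_one L (0,0) hLne]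
      have h2 := List.getLast?_eq_some_getLast hLne
      rw [h2] at hLlast
      exact Option.some_injective _ hLlast
    simp only [calcP_false]
    rw [hloop]
    simp only [List.tail_cons, PySem.List.pyGetD_zero_cons, hget0, hgetm1, foldB1]
  · rw [if_neg hb, if_neg hb]
    rw [if_neg (show ¬ pvBranch1 arm telcent = true from hb)] at hbr
    have hloop := loopQ_spec (s0 :: t) ((s0 :: t).length + 1) (s0 :: t) (by omega) hbr
    have hCne : chooseQ (s0 :: t) ≠ [] := chooseQ_ne_nil _ (by simp)
    have hends := calcQ_true_ends (s0 :: t) (chooseQ (s0 :: t)) hCne (chooseQ_getLast? _)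
    set L := (calcLensQ (s0 :: t) (chooseQ (s0 :: t)) true).2.2 with hL
    obtain ⟨c, cl, hC⟩ := List.exists_cons_of_ne_nil hCne
    have hLhead : L.head? = some c := by
      rw [hends.1, hC]
      rfl
    have hLlast : L.getLast? = some ((s0 :: t).getLast (by simp)) := by
      rw [hends.2, chooseQ_getLast?, List.getLast?_eq_some_getLast (by simp)]
    have hget0 : PySem.List.pyGetD L 0 (0,0) = c := by
      cases hLc : L with
      | nil => rw [hLc] at hLhead; simp at hLhead
      | cons a l =>
        rw [hLc] at hLhead
        rw [PySem.List.pyGetD_zero_cons]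
        simpa using hLhead
    have hLne : L ≠ [] := by
      intro h0
      rw [h0] at hLhead
      simp at hLhead
    have hgetm1 : PySem.List.pyGetD L (-1) (0,0) = (s0 :: t).getLast (by simp) := by
      rw [PySem.List.pyGetD_neg_one L (0,0) hLne]
      have h2 := List.getLast?_eq_some_getLast hLne
      rw [h2] at hLlast
      exact Option.some_injective _ hLlast
    have hlastJ : PySem.List.pyGetD (s0 :: t) (-1) (0,0) = (s0 :: t).getLast (by simp) :=
      PySem.List.pyGetD_neg_one _ (0,0) (by simp)
    simp only [calcQ_false]
    rw [hloop]
    simp only [List.tail_cons, PySem.List.pyGetD_zero_cons, hget0, hgetm1, hlastJ, foldB2]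
    rw [trimB2 _ hbr, hC]
    simp
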